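-- pv_equiv track=rewrite | github.com/DanRoeszler/will-generator-qld-review | clause_logic.py | validate_clause_order
-- ===== SOURCE A (Python) =====
-- from typing import List, Set, Dict, Any
-- from enum import Enum
--
-- class ClauseId(str, Enum):
--     """Stable clause identifiers."""
--     TITLE_IDENTIFICATION = 'title_identification'
--     REVOCATION = 'revocation'
--     DEFINITIONS = 'definitions'
--     APPOINTMENT_EXECUTORS_TRUSTEES = 'appointment_executors_trustees'
--     FUNERAL_WISHES = 'funeral_wishes'
--     GUARDIANSHIP = 'guardianship'
--     DISTRIBUTION_OVERVIEW = 'distribution_overview'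
--     SPECIFIC_GIFTS = 'specific_gifts'
--     RESIDUE_DISTRIBUTION = 'residue_distribution'
--     SURVIVORSHIP = 'survivorship'
--     SUBSTITUTION = 'substitution'
--     MINOR_TRUSTS = 'minor_trusts'
--     ADMINISTRATIVE_POWERS = 'administrative_powers'
--     DIGITAL_ASSETS = 'digital_assets'
--     PETS = 'pets'
--     BUSINESS_INTERESTS = 'business_interests'
--     EXCLUSION_NOTE = 'exclusion_note'
--     LIFE_SUSTAINING_STATEMENT = 'life_sustaining_statement'
--     ATTESTATION = 'attestation'
--
-- CLAUSE_ORDER: List[ClauseId] = [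
--     ClauseId.TITLE_IDENTIFICATION,
--     ClauseId.REVOCATION,
--     ClauseId.DEFINITIONS,
--     ClauseId.APPOINTMENT_EXECUTORS_TRUSTEES,
--     ClauseId.FUNERAL_WISHES,
--     ClauseId.GUARDIANSHIP,
--     ClauseId.DISTRIBUTION_OVERVIEW,
--     ClauseId.SPECIFIC_GIFTS,
--     ClauseId.RESIDUE_DISTRIBUTION,
--     ClauseId.SURVIVORSHIP,
--     ClauseId.SUBSTITUTION,
--     ClauseId.MINOR_TRUSTS,
--     ClauseId.ADMINISTRATIVE_POWERS,
--     ClauseId.DIGITAL_ASSETS,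
--     ClauseId.PETS,
--     ClauseId.BUSINESS_INTERESTS,
--     ClauseId.EXCLUSION_NOTE,
--     ClauseId.LIFE_SUSTAINING_STATEMENT,
--     ClauseId.ATTESTATION,
-- ]
--
-- def validate_clause_order(clauses: List[ClauseId]) -> bool:
--     """
--     Validate that clause order follows the defined order.
--
--     Args:
--         clauses: List of clause IDs to validate
--
--     Returns:
--         True if order is valid
--     """
--     # Check that clauses appear in the same relative order as CLAUSE_ORDER
--     last_index = -1
--     for clause in clauses:
--         try:
--             current_index = CLAUSE_ORDER.index(clause)
--             if current_index <= last_index: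
--                 return False
--             last_index = current_index
--         except ValueError:
--             return False  # Unknown clause
--
--     return True
-- ===== SOURCE B (Python) =====
-- CLAUSE_ORDER = [
--     'title_identification',
--     'revocation',
--     'definitions',
--     'appointment_executors_trustees',
--     'funeral_wishes',
--     'guardianship',
--     'distribution_overview',
--     'specific_gifts',
--     'residue_distribution',
--     'survivorship',
--     'substitution',
--     'minor_trusts',
--     'administrative_powers',
--     'digital_assets',
--     'pets',
--     'business_interests',
--     'exclusion_note',
--     'life_sustaining_statement',
--     'attestation',
-- ]
--
-- def validate_clause_order(clauses):
--     # Valid iff clauses is a subsequence of CLAUSE_ORDER (which is duplicate-free):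
--     # walk the canonical order once with a consumed iterator (two-pointer scan);
--     # no indices are ever computed.
--     it = iter(CLAUSE_ORDER)
--     return all(c in it for c in clauses)
-- ===== Notes on version B (the rewrite author's own statement) =====
-- stated objective: simpler
-- what changed: A threads a running last_index through repeated CLAUSE_ORDER.index scans; B never computes an index: it checks that clauses is a subsequence of the duplicate-free CLAUSE_ORDER with a two-pointer scan over a consumed iterator (all(c in it for c in clauses)).
import Mathlib
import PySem

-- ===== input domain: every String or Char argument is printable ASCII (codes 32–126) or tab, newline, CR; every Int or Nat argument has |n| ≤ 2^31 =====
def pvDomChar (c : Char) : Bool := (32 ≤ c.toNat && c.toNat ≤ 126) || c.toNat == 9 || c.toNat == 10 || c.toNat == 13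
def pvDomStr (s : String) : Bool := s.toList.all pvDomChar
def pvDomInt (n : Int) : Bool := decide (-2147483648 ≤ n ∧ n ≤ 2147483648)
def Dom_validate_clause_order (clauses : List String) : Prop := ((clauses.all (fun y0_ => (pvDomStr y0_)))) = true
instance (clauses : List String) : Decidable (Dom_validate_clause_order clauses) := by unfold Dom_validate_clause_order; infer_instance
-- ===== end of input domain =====

-- B replaces A's index-threading scan by a two-pointer subsequence check of the
-- (duplicate-free) canonical order, never computing indices (objective: simpler).

-- ===== PORT A =====
-- the module constant CLAUSE_ORDER (ClauseId is a str Enum; values are these strings)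
def clauseOrderList : List String := [
  "title_identification", "revocation", "definitions",
  "appointment_executors_trustees", "funeral_wishes", "guardianship",
  "distribution_overview", "specific_gifts", "residue_distribution",
  "survivorship", "substitution", "minor_trusts", "administrative_powers",
  "digital_assets", "pets", "business_interests", "exclusion_note",
  "life_sustaining_statement", "attestation"]

-- the for-loop of A: threads last_index, returns False on unknown clause or non-increase
def validateLoopA : List String → Int → Bool
  | [], _ => true
  | c :: rest, last =>
    match PySem.List.index? clauseOrderList c with
    | none => false            -- ValueError: unknown clause
    | some i => if (i : Int) ≤ last then false else validateLoopA rest (i : Int)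

def validate_clause_order (clauses : List String) : Bool :=
  validateLoopA clauses (-1)

-- ===== PORT B =====
-- 'all(c in it for c in clauses)' over a consumed iterator of CLAUSE_ORDER:
-- a two-pointer scan; 'c in it' advances the order pointer past the first match of c,
-- exhausting the iterator (→ False) if c never appears in what remains.
def subseqB : List String → List String → Bool
  | [], _ => true                     -- all clauses consumed
  | _ :: _, [] => false               -- iterator exhausted: 'c in it' is False
  | c :: cs, o :: os => if c = o then subseqB cs os else subseqB (c :: cs) os

def validate_clause_order_alt (clauses : List String) : Bool :=
  subseqB clauses clauseOrderList

-- ===== PRECONDITION & SPEC =====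
def Spec_validate_clause_order (clauses : List String) (out : Bool) : Prop := out = validate_clause_order_alt clauses
instance (clauses : List String) (out : Bool) : Decidable (Spec_validate_clause_order clauses out) := by unfold Spec_validate_clause_order; infer_instance

-- ===== CLAIM (what is proved, stated in full; the proofs are below) =====
def Claim_equal_validate_clause_order : Prop := ∀ (clauses : List String), Dom_validate_clause_order clauses → Spec_validate_clause_order clauses (validate_clause_order clauses)

-- ===== LEMMAS AND PROOFS =====

lemma subseqB_not_mem (c : String) (cs : List String) :
    ∀ os : List String, c ∉ os → subseqB (c :: cs) os = false := by
  intro os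
  induction os with
  | nil => intro _; rfl
  | cons o os ih =>
    intro h
    have hne : c ≠ o := fun he => h (he ▸ List.mem_cons_self)
    simp [subseqB, hne, ih (fun hm => h (List.mem_cons_of_mem _ hm))]

lemma subseqB_skip (c : String) (cs s : List String) :
    ∀ p : List String, c ∉ p → subseqB (c :: cs) (p ++ c :: s) = subseqB cs s := by
  intro p
  induction p with
  | nil => intro _; simp [subseqB]
  | cons q p ih =>
    intro h
    have hne : c ≠ q := fun he => h (he ▸ List.mem_cons_self)
    simp [subseqB, hne, ih (fun hm => h (List.mem_cons_of_mem _ hm))]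

lemma clauseOrder_nodup : clauseOrderList.Nodup := by decide

lemma loopA_eq_subseq : ∀ (clauses : List String) (k : Nat),
    validateLoopA clauses ((k : Int) - 1) = subseqB clauses (clauseOrderList.drop k) := by
  intro clauses
  induction clauses with
  | nil => intro k; simp [validateLoopA, subseqB]
  | cons c cs ih =>
    intro k
    simp only [validateLoopA]
    cases hidx : PySem.List.index? clauseOrderList c with
    | none =>
      have hmem : c ∉ clauseOrderList := by
        rw [PySem.List.index?_eq_none_iff] at hidx; exact hidx
      have : c ∉ clauseOrderList.drop k :=
        fun hm => hmem ((List.drop_sublist k _).subset hm)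
      rw [subseqB_not_mem c cs _ this]
    | some i =>
      obtain ⟨pre, suf, hdec, hlen, hpre⟩ := (PySem.List.index?_eq_some_iff _ _ _).mp hidx
      by_cases hle : (i : Int) ≤ (k : Int) - 1
      · -- i < k : A returns False; c is not in the dropped tail (nodup)
        simp only [hle, if_true]
        have hik : i + 1 ≤ k := by omega
        have hcsuf : c ∉ suf := by
          have hnd : (c :: suf).Nodup :=
            (List.sublist_append_right pre (c :: suf)).nodup (hdec ▸ clauseOrder_nodup)
          exact (List.nodup_cons.mp hnd).1
        have hdrop : clauseOrderList.drop k = suf.drop (k - (i + 1)) := by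
          rw [hdec, List.drop_append,
              List.drop_eq_nil_of_le (by omega : pre.length ≤ k),
              show k - pre.length = (k - (i + 1)) + 1 by omega]
          simp
        have : c ∉ clauseOrderList.drop k := by
          rw [hdrop]
          exact fun hm => hcsuf ((List.drop_sublist _ _).subset hm)
        rw [subseqB_not_mem c cs _ this]
      · -- i ≥ k : both advance past the first occurrence of c
        simp only [hle, if_false]
        have hki : k ≤ pre.length := by omega
        have hdrop : clauseOrderList.drop k = pre.drop k ++ c :: suf := by
          rw [hdec, List.drop_append_of_le_length hki]
        have hnot : c ∉ pre.drop k :=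
          fun hm => hpre ((List.drop_sublist _ _).subset hm)
        rw [hdrop, subseqB_skip c cs suf _ hnot]
        have hsuf : clauseOrderList.drop (i + 1) = suf := by
          rw [hdec, List.drop_append,
              List.drop_eq_nil_of_le (by omega : pre.length ≤ i + 1),
              show i + 1 - pre.length = 1 by omega]
          simp
        have := ih (i + 1)
        rw [hsuf] at this
        rw [show (i : Int) = ((i + 1 : Nat) : Int) - 1 by push_cast; ring]
        exact this

-- ===== VERDICT (by name: the statement is the Claim_ definition above) =====
theorem validate_clause_order_spec : Claim_equal_validate_clause_order := by
  intro clauses _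
  unfold Spec_validate_clause_order validate_clause_order validate_clause_order_alt
  have := loopA_eq_subseq clauses 0
  simpa using this
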